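-- pv_equiv track=rewrite | github.com/epic-rg/Learning-Python | foundation3-intermediate/anyBaseMultiplication.py | digitMultiply
-- ===== SOURCE A (Python) =====
-- def digitMultiply(num, digit, base):
--     result = 0
--     carry = 0
--     x = 0
--
--     while num > 0 or carry > 0:
--         q = num % 10
--         product = q * digit + carry
--         carry = product // base
--         digit_result = product % base
--
--         result += digit_result * (10 ** x)
--         x += 1
--
--         num //= 10
--
--     return result
-- ===== SOURCE B (Python) =====
-- def digitMultiply(num, digit, base):
--     # Recursive formulation: each call handles one base-10 digit via divmod and
--     # contributes its base-digit directly as d + 10 * rest (no power/accumulator bookkeeping).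
--     def go(n, c):
--         if n <= 0 and c <= 0:
--             return 0
--         n2, q = divmod(n, 10)
--         c2, d = divmod(q * digit + c, base)
--         return d + 10 * go(n2, c2)
--
--     return go(num, 0)
-- ===== Notes on version B (the rewrite author's own statement) =====
-- stated objective: alternative
-- what changed: B replaces A's iterative loop with mutable accumulator, carry, counter and result += digit_result * 10**x by a direct recursion go(n, c) using divmod that returns d + 10 * go(n//10, carry), eliminating the power-of-ten and result bookkeeping entirely.
import Mathlib
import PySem

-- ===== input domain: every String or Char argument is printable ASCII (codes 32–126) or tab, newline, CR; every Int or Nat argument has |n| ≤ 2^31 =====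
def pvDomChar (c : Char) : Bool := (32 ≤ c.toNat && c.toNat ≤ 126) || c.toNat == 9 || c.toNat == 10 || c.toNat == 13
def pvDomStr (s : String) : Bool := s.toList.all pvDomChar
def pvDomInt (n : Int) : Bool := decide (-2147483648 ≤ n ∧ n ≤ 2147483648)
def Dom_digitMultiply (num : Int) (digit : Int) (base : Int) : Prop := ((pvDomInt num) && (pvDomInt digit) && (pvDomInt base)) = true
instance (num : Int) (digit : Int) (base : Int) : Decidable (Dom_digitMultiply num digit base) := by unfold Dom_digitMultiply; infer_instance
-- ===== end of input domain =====

-- B replaces A's iterative accumulator/power-of-ten loop by a direct divmod recursion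
-- returning d + 10 * rest (objective: alternative). The while loop is not structurally
-- terminating in Lean; both ports run on fuel 1000, ample for every input admitted by
-- Pre_ within Dom (at most ~50 iterations occur there).

-- ===== PORT A =====
-- literal transliteration of A's while loop: state (num, carry, x, result)
def digitMultiplyLoopA (digit : Int) (base : Int) : Nat → Int → Int → Nat → Int → Int
  | 0, _, _, _, result => result
  | fuel + 1, num, carry, x, result =>
    if num > 0 ∨ carry > 0 then
      let q := PySem.Int.mod num 10
      let product := q * digit + carry
      let carry' := PySem.Int.floordiv product base
      let digit_result := PySem.Int.mod product base
      digitMultiplyLoopA digit base fuel (PySem.Int.floordiv num 10) carry' (x + 1)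
        (result + digit_result * (10 : Int) ^ x)
    else result

def digitMultiply (num : Int) (digit : Int) (base : Int) : Int :=
  digitMultiplyLoopA digit base 1000 num 0 0 0

-- ===== PORT B =====
-- Source B's inner recursion go(n, c); divmod(_, base) raises for base = 0 in Python
-- (PySem.Int.divmod? = none there), an input Pre_ excludes; the port returns 0 on none.
def digitMultiplyGo (digit : Int) (base : Int) : Nat → Int → Int → Int
  | 0, _, _ => 0
  | fuel + 1, n, c =>
    if n ≤ 0 ∧ c ≤ 0 then 0
    else
      match PySem.Int.divmod? n 10 with
      | none => 0
      | some (n2, q) =>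
        match PySem.Int.divmod? (q * digit + c) base with
        | none => 0
        | some (c2, d) => d + 10 * digitMultiplyGo digit base fuel n2 c2

def digitMultiply_alt (num : Int) (digit : Int) (base : Int) : Int :=
  digitMultiplyGo digit base 1000 num 0

-- ===== PRECONDITION & SPEC =====
-- Pre_ excludes exactly the inputs where Python A does not return: base = 0 raises
-- ZeroDivisionError, and base = 1 with num > 0 and digit > 0 loops forever.
def Pre_digitMultiply (num : Int) (digit : Int) (base : Int) : Prop :=
  base ≠ 0 ∧ ¬(base = 1 ∧ num > 0 ∧ digit > 0)
instance (num : Int) (digit : Int) (base : Int) : Decidable (Pre_digitMultiply num digit base) := by unfold Pre_digitMultiply; infer_instance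
def pvWitness_digitMultiply : Int × Int × Int := (123, 7, 8)

def Spec_digitMultiply (num : Int) (digit : Int) (base : Int) (out : Int) : Prop := out = digitMultiply_alt num digit base
instance (num : Int) (digit : Int) (base : Int) (out : Int) : Decidable (Spec_digitMultiply num digit base out) := by unfold Spec_digitMultiply; infer_instance

-- ===== CLAIM (what is proved, stated in full; the proofs are below) =====
def Claim_equal_digitMultiply : Prop := ∀ (num : Int) (digit : Int) (base : Int), Dom_digitMultiply num digit base → Pre_digitMultiply num digit base → Spec_digitMultiply num digit base (digitMultiply num digit base)

-- ===== LEMMAS AND PROOFS =====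

-- with base ≠ 0, A's loop equals result + 10^x times B's recursion value
theorem pvLoopA_eq (digit base : Int) (hb : base ≠ 0) (fuel : Nat) :
    ∀ (num carry : Int) (x : Nat) (result : Int),
      digitMultiplyLoopA digit base fuel num carry x result =
        result + digitMultiplyGo digit base fuel num carry * (10 : Int) ^ x := by
  induction fuel with
  | zero => intro num carry x result; simp [digitMultiplyLoopA, digitMultiplyGo]
  | succ f ih =>
    intro num carry x result
    simp only [digitMultiplyLoopA, digitMultiplyGo]
    by_cases h : num > 0 ∨ carry > 0
    · have h' : ¬(num ≤ 0 ∧ carry ≤ 0) := by omega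
      rw [if_pos h, if_neg h', ih]
      simp only [PySem.Int.divmod?, hb]
      simp only [show (10 : Int) ≠ 0 by norm_num, reduceIte, pow_succ,
        PySem.Int.mod, PySem.Int.floordiv, mul_comm]
      ring
    · have h' : num ≤ 0 ∧ carry ≤ 0 := by omega
      rw [if_neg h, if_pos h']
      ring

-- ===== VERDICT (by name: the statement is the Claim_ definition above) =====
theorem digitMultiply_spec : Claim_equal_digitMultiply := by
  intro num digit base _ hpre
  unfold Spec_digitMultiply digitMultiply digitMultiply_alt
  rw [pvLoopA_eq digit base hpre.1]
  ring
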